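-- pv_equiv track=rewrite | github.com/ronaldzgithub/VolvenceZero | volvence_zero/substrate/residual_backend.py | _semantic_tokens
-- ===== SOURCE A (Python) =====
-- def _semantic_tokens(text: str) -> tuple[str, ...]:
--     tokens: list[str] = []
--     ascii_buffer: list[str] = []
--     lowered = text.lower()
--     compact = "".join(char for char in lowered if not char.isspace())
--     for char in lowered:
--         if char.isascii() and char.isalnum():
--             ascii_buffer.append(char)
--             continue
--         if ascii_buffer:
--             tokens.append("".join(ascii_buffer))
--             ascii_buffer.clear()
--         if not char.isspace():
--             tokens.append(char)
--     if ascii_buffer: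
--         tokens.append("".join(ascii_buffer))
--     for width in (2, 3, 4, 5):
--         tokens.extend(compact[index : index + width] for index in range(max(len(compact) - width + 1, 0)))
--     return tuple(tokens)
-- ===== SOURCE B (Python) =====
-- def _semantic_tokens(text: str) -> tuple[str, ...]:
--     lowered = text.lower()
--     compact = "".join(c for c in lowered if not c.isspace())
--     tokens: list[str] = []
--     i, n = 0, len(lowered)
--     while i < n:
--         c = lowered[i]
--         if c.isascii() and c.isalnum():
--             j = i + 1
--             while j < n and lowered[j].isascii() and lowered[j].isalnum():
--                 j += 1
--             tokens.append(lowered[i:j])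
--             i = j
--         else:
--             if not c.isspace():
--                 tokens.append(c)
--             i += 1
--     tokens += [
--         compact[k : k + width]
--         for width in (2, 3, 4, 5)
--         for k in range(max(len(compact) - width + 1, 0))
--     ]
--     return tuple(tokens)
-- ===== Notes on version B (the rewrite author's own statement) =====
-- stated objective: alternative
-- what changed: The per-character buffer-accumulator loop is replaced by a run scanner that emits each maximal ascii-alnum run as one token via an inner scan (takeWhile/dropWhile), and the four n-gram passes become a single flat comprehension appended at once.
import Mathlib
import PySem

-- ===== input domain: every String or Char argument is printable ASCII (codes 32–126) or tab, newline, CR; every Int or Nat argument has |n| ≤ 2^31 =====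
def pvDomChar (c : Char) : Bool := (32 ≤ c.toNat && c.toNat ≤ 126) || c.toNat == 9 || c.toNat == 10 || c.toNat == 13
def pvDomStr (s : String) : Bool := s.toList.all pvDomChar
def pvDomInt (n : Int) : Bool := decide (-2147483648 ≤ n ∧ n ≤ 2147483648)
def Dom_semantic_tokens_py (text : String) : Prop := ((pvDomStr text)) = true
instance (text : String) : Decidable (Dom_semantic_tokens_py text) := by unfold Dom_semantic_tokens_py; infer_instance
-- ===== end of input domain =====

-- B replaces A's per-character buffer accumulator by a run scanner (takeWhile/dropWhile over alnum
-- runs) and builds the n-grams as one flat comprehension: simpler decomposition, same cost.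

-- shared key: Python's 'c.isascii() and c.isalnum()' (isascii = codepoint ≤ 127, exact)
def pvIsAl (c : Char) : Bool := decide (c.toNat ≤ 127) && PySem.Chars.isalnum c

-- ===== PORT A =====
-- flush of A's ascii_buffer: append the joined buffer iff it is nonempty
def pvFlushA (st : List String × List Char) : List String :=
  if st.2.isEmpty then st.1 else st.1 ++ [String.ofList st.2]

-- one iteration of A's for-loop over lowered, state = (tokens, ascii_buffer)
def pvStepA (st : List String × List Char) (c : Char) : List String × List Char :=
  if pvIsAl c then (st.1, st.2 ++ [c])
  else
    let toks := pvFlushA st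
    if PySem.Chars.isspace c then (toks, []) else (toks ++ [String.ofList [c]], [])

def semantic_tokens_py (text : String) : List String :=
  let lowered := PySem.Chars.lower text.toList
  let compact := lowered.filter (fun c => !PySem.Chars.isspace c)
  let tokens := pvFlushA (lowered.foldl pvStepA ([], []))
  [(2 : Int), 3, 4, 5].foldl (fun acc width =>
    acc ++ (PySem.List.pyRange 0 (max ((compact.length : Int) - width + 1) 0) 1).map
      (fun idx => String.ofList (PySem.List.slice compact (some idx) (some (idx + width))))) tokens

-- ===== PORT B =====
-- B's while-loop run scanner: a whole maximal alnum run becomes one token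
def pvWords (cs : List Char) : List String :=
  match cs with
  | [] => []
  | c :: rest =>
    if pvIsAl c then
      String.ofList (c :: rest.takeWhile pvIsAl) :: pvWords (rest.dropWhile pvIsAl)
    else if PySem.Chars.isspace c then pvWords rest
    else String.ofList [c] :: pvWords rest
termination_by cs.length
decreasing_by
  · exact Nat.lt_succ_of_le (List.length_dropWhile_le _ _)
  · simp
  · simp

def semantic_tokens_py_alt (text : String) : List String :=
  let lowered := PySem.Chars.lower text.toList
  let compact := lowered.filter (fun c => !PySem.Chars.isspace c)
  -- 'cs.length + 1 - w' in Nat is Python's max(len(compact) - width + 1, 0)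
  pvWords lowered ++ [2, 3, 4, 5].flatMap (fun (w : Nat) =>
    (List.range (compact.length + 1 - w)).map (fun k => String.ofList ((compact.drop k).take w)))

-- ===== PRECONDITION & SPEC =====
def Spec_semantic_tokens_py (text : String) (out : List String) : Prop := out = semantic_tokens_py_alt text
instance (text : String) (out : List String) : Decidable (Spec_semantic_tokens_py text out) := by unfold Spec_semantic_tokens_py; infer_instance

-- ===== CLAIM (what is proved, stated in full; the proofs are below) =====
def Claim_equal_semantic_tokens_py : Prop := ∀ (text : String), Dom_semantic_tokens_py text → Spec_semantic_tokens_py text (semantic_tokens_py text)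

-- ===== LEMMAS AND PROOFS =====

lemma pvTW_append (buf ys : List Char) (h : ∀ x ∈ buf, pvIsAl x = true) :
    (buf ++ ys).takeWhile pvIsAl = buf ++ ys.takeWhile pvIsAl ∧
    (buf ++ ys).dropWhile pvIsAl = ys.dropWhile pvIsAl := by
  induction buf with
  | nil => simp
  | cons b bs ih =>
    have hb : pvIsAl b = true := h b (by simp)
    have := ih (fun x hx => h x (by simp [hx]))
    simp [hb, this.1, this.2]

lemma pvWords_all (buf : List Char) (h : ∀ x ∈ buf, pvIsAl x = true) :
    pvWords buf = if buf.isEmpty then [] else [String.ofList buf] := by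
  cases buf with
  | nil => simp [pvWords]
  | cons b bs =>
    have hb : pvIsAl b = true := h b (by simp)
    have htw := pvTW_append bs [] (fun x hx => h x (by simp [hx]))
    simp only [List.append_nil, List.takeWhile_nil, List.dropWhile_nil] at htw
    rw [pvWords]
    simp [hb, htw.1, htw.2, pvWords]

lemma pvWords_flush (buf : List Char) (c : Char) (rest : List Char)
    (h : ∀ x ∈ buf, pvIsAl x = true) (hc : pvIsAl c = false) :
    pvWords (buf ++ c :: rest) =
      (if buf.isEmpty then [] else [String.ofList buf]) ++ pvWords (c :: rest) := by
  cases buf with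
  | nil => simp
  | cons b bs =>
    have hb : pvIsAl b = true := h b (by simp)
    have htw := pvTW_append bs (c :: rest) (fun x hx => h x (by simp [hx]))
    rw [List.cons_append, pvWords]
    simp [hb, htw.1, htw.2, hc]

lemma pvFlushA_eq (toks : List String) (buf : List Char) :
    pvFlushA (toks, buf) = toks ++ (if buf.isEmpty then [] else [String.ofList buf]) := by
  by_cases hb : buf.isEmpty <;> simp [pvFlushA, hb]

lemma pvWords_foldl (cs : List Char) : ∀ (toks : List String) (buf : List Char),
    (∀ x ∈ buf, pvIsAl x = true) →
    pvFlushA (cs.foldl pvStepA (toks, buf)) = toks ++ pvWords (buf ++ cs) := by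
  induction cs with
  | nil =>
    intro toks buf h
    simp [pvFlushA_eq, pvWords_all buf h]
  | cons c rest ih =>
    intro toks buf h
    by_cases hc : pvIsAl c = true
    · rw [List.foldl_cons, show pvStepA (toks, buf) c = (toks, buf ++ [c]) from by
        simp [pvStepA, hc]]
      rw [ih toks (buf ++ [c]) (by
        intro x hx
        rcases List.mem_append.mp hx with h1 | h1
        · exact h x h1
        · simp at h1; simpa [h1] using hc)]
      simp
    · have hcf : pvIsAl c = false := by simpa using hc
      by_cases hs : PySem.Chars.isspace c = true
      · rw [List.foldl_cons, show pvStepA (toks, buf) c = (pvFlushA (toks, buf), []) from by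
          simp [pvStepA, hcf, hs]]
        rw [ih (pvFlushA (toks, buf)) [] (by simp)]
        rw [pvWords_flush buf c rest h hcf, pvFlushA_eq]
        rw [pvWords]
        simp [hcf, hs]
      · have hsf : PySem.Chars.isspace c = false := by simpa using hs
        rw [List.foldl_cons, show pvStepA (toks, buf) c =
            (pvFlushA (toks, buf) ++ [String.ofList [c]], []) from by
          simp [pvStepA, hcf, hsf]]
        rw [ih (pvFlushA (toks, buf) ++ [String.ofList [c]]) [] (by simp)]
        rw [pvWords_flush buf c rest h hcf, pvFlushA_eq]
        rw [pvWords]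
        simp [hcf, hsf]

lemma pvNgram (cs : List Char) (w : Nat) :
    (PySem.List.pyRange 0 (max ((cs.length : Int) - (w : Int) + 1) 0) 1).map
        (fun idx => String.ofList (PySem.List.slice cs (some idx) (some (idx + (w : Int))))) =
    (List.range (cs.length + 1 - w)).map (fun k => String.ofList ((cs.drop k).take w)) := by
  rw [PySem.List.pyRange_one]
  have hlen : (max ((cs.length : Int) - (w : Int) + 1) 0 - 0).toNat = cs.length + 1 - w := by
    omega
  rw [hlen, List.map_map]
  refine List.map_congr_left ?_
  intro k _
  simp only [Function.comp, zero_add]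
  rw [PySem.List.slice_natCast_add]

lemma pvFoldlNgrams (cs : List Char) (init : List String) :
    [(2 : Int), 3, 4, 5].foldl (fun acc width =>
      acc ++ (PySem.List.pyRange 0 (max ((cs.length : Int) - width + 1) 0) 1).map
        (fun idx => String.ofList (PySem.List.slice cs (some idx) (some (idx + width))))) init =
    init ++ [2, 3, 4, 5].flatMap (fun (w : Nat) =>
      (List.range (cs.length + 1 - w)).map (fun k => String.ofList ((cs.drop k).take w))) := by
  have h2 := pvNgram cs 2
  have h3 := pvNgram cs 3
  have h4 := pvNgram cs 4
  have h5 := pvNgram cs 5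
  norm_num at h2 h3 h4 h5
  simp [List.foldl_cons, List.flatMap_cons, h2, h3, h4, h5]

-- ===== VERDICT (by name: the statement is the Claim_ definition above) =====
theorem semantic_tokens_py_spec : Claim_equal_semantic_tokens_py := by
  intro text _
  unfold Spec_semantic_tokens_py semantic_tokens_py semantic_tokens_py_alt
  rw [pvFoldlNgrams, pvWords_foldl _ [] [] (by simp)]
  simp
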